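-- pv_equiv track=rewrite | github.com/choumanhussein/Binary_search.py | selection_sort.py | Find_smallest
-- ===== SOURCE A (Python) =====
-- def Find_smallest(arr):
--     smallest = arr[0]
--     smallest_index = 0
--     for i in range (1, len(arr)):
--         if arr[i] < smallest:
--             smallest = arr [i]
--             smallest_index = i
--     return smallest_index
-- ===== SOURCE B (Python) =====
-- def Find_smallest(arr):
--     return sorted(range(len(arr)), key=lambda i: arr[i])[0]
-- ===== Notes on version B (the rewrite author's own statement) =====
-- stated objective: alternative
-- what changed: Replaces the best-so-far tracking loop with a stable sort of the index range by element value followed by taking the first sorted index; stability makes the head of the sorted indices the first occurrence of the minimum, matching A's strict-< rule.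
import Mathlib
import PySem

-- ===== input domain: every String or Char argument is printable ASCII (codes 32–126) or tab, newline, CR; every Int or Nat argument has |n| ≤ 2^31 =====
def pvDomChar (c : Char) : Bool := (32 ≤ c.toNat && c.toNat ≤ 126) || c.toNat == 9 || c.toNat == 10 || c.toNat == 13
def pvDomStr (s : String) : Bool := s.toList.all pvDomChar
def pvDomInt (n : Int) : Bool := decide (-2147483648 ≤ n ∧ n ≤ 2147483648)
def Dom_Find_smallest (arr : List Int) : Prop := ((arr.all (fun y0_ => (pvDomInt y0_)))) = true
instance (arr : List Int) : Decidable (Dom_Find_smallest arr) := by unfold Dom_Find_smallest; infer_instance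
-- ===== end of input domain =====

-- B replaces A's best-so-far tracking loop with a stable sort of the indices by element
-- value and takes the first sorted index (same first-occurrence tie rule by stability).


-- ===== PORT A =====
-- transliteration of A: smallest = arr[0]; smallest_index = 0; for i in range(1, len(arr)): …
-- arr[i] is read via pyGetD (every i the loop visits is in range; arr[0] is exact because
-- Pre_ excludes the empty list, where Python raises IndexError)
def Find_smallest (arr : List Int) : Int :=
  (List.foldl
    (fun (p : Int × Int) (i : Int) =>
      if PySem.List.pyGetD arr i 0 < p.1 then (PySem.List.pyGetD arr i 0, i) else p)
    (PySem.List.pyGetD arr 0 0, 0)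
    (PySem.List.pyRange 1 (arr.length : Int) 1)).2

-- ===== PORT B =====
-- transliteration of B: sorted(range(len(arr)), key=lambda i: arr[i])[0]; the [0] is
-- pyGet? at 0 (none = IndexError on the empty list, which Pre_ excludes)
def Find_smallest_alt (arr : List Int) : Int :=
  (PySem.List.pyGet?
    (PySem.List.sorted (PySem.List.pyRange 0 (arr.length : Int) 1)
      (fun i => PySem.List.pyGetD arr i 0))
    0).getD 0

-- ===== PRECONDITION & SPEC =====
-- A raises IndexError on the empty list (arr[0]); B's [0] raises IndexError there too.
def Pre_Find_smallest (arr : List Int) : Prop := arr ≠ []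
instance (arr : List Int) : Decidable (Pre_Find_smallest arr) := by unfold Pre_Find_smallest; infer_instance
def pvWitness_Find_smallest : List Int := [3, 1, 2]
def Spec_Find_smallest (arr : List Int) (out : Int) : Prop := out = Find_smallest_alt arr
instance (arr : List Int) (out : Int) : Decidable (Spec_Find_smallest arr out) := by unfold Spec_Find_smallest; infer_instance

-- ===== CLAIM (what is proved, stated in full; the proofs are below) =====
def Claim_equal_Find_smallest : Prop := ∀ (arr : List Int), Dom_Find_smallest arr → Pre_Find_smallest arr → Spec_Find_smallest arr (Find_smallest arr)

-- ===== LEMMAS AND PROOFS =====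

-- head of the insertion-sort fold over a nonempty accumulator is the first-extremal fold
theorem head_foldl_insertBy (bf : Int → Int → Bool) (l : List Int) (m : Int) (t : List Int) :
    (List.foldl (fun acc x => PySem.List.insertBy bf x acc) (m :: t) l).head?
      = some (List.foldl (fun c x => if bf x c then x else c) m l) := by
  induction l generalizing m t with
  | nil => rfl
  | cons x xs ih =>
      simp only [List.foldl, PySem.List.insertBy]
      by_cases h : bf x m <;> simp [h, ih]

-- A's pair fold keeps `fst = key snd`, hence its snd is the index-only fold
theorem pair_fold_eq (key : Int → Int) (l : List Int) (j : Int) :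
    List.foldl (fun (p : Int × Int) i => if key i < p.1 then (key i, i) else p) (key j, j) l
    = (key (List.foldl (fun c i => if key i < key c then i else c) j l),
       List.foldl (fun c i => if key i < key c then i else c) j l) := by
  induction l generalizing j with
  | nil => rfl
  | cons x t ih =>
      simp only [List.foldl]
      by_cases h : key x < key j <;> simp [h, ih]

-- xs[0] of a list whose head is known
theorem pyGet?_zero_of_head? (l : List Int) (v : Int) (h : l.head? = some v) :
    PySem.List.pyGet? l 0 = some v := by
  cases l with
  | nil => simp at h
  | cons a t => simp at h; simp [PySem.List.pyGet?, PySem.List.pyIdx?, h]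

-- ===== VERDICT (by name: the statement is the Claim_ definition above) =====
theorem Find_smallest_spec : Claim_equal_Find_smallest := by
  intro arr _ hpre
  unfold Spec_Find_smallest Find_smallest Find_smallest_alt
  have hlen : (0 : Int) < (arr.length : Int) := by
    cases arr with
    | nil => exact absurd rfl hpre
    | cons a t => simp
  set key : Int → Int := fun i => PySem.List.pyGetD arr i 0 with hkey
  rw [PySem.List.sorted_eq_foldl_insertBy, PySem.List.pyRange_one_cons hlen]
  simp only [List.foldl]
  have hhead := head_foldl_insertBy (fun a b => decide (key a < key b))
      (PySem.List.pyRange 1 (arr.length : Int) 1) 0 []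
  have h0 : PySem.List.insertBy (fun a b => decide (key a < key b)) 0 [] = [0] := rfl
  rw [show ((0:Int) + 1) = (1:Int) by norm_num] at *
  rw [h0] at *
  rw [pyGet?_zero_of_head? _ _ hhead]
  have h1 : (PySem.List.pyGetD arr 0 0, (0 : Int)) = (key 0, 0) := rfl
  rw [h1, pair_fold_eq key]
  simp only [Option.getD_some]
  congr 1
  funext c x
  by_cases h : key x < key c <;> simp [h]
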